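-- pv_equiv track=rewrite | github.com/mnghiap/oa-practice | group_students.py | group_students
-- ===== SOURCE A (Python) =====
-- def group_students(levels, max_spread):
--     levels.sort()
--     groups = 0
--     for i, lvl in enumerate(levels):
--         if i == 0 or (lvl - cur_min) > max_spread:
--             groups += 1
--             cur_min = lvl
--     return groups
-- ===== SOURCE B (Python) =====
-- def group_students(levels, max_spread):
--     levels.sort()
--     n = len(levels)
--     groups = 0
--     i = 0
--     while i < n:
--         groups += 1
--         bound = levels[i] + max_spread
--         # binary search (bisect_right) for the first index > i whose level exceeds bound
--         lo, hi = i + 1, n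
--         while lo < hi:
--             mid = (lo + hi) // 2
--             if levels[mid] <= bound:
--                 lo = mid + 1
--             else:
--                 hi = mid
--         i = lo
--     return groups
-- ===== Notes on version B (the rewrite author's own statement) =====
-- stated objective: alternative
-- what changed: Instead of a linear scan comparing every element to a running minimum, B jumps from group start to group start on the sorted list with a hand-written bisect_right binary search, touching O(log n) elements per group.
import Mathlib
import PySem

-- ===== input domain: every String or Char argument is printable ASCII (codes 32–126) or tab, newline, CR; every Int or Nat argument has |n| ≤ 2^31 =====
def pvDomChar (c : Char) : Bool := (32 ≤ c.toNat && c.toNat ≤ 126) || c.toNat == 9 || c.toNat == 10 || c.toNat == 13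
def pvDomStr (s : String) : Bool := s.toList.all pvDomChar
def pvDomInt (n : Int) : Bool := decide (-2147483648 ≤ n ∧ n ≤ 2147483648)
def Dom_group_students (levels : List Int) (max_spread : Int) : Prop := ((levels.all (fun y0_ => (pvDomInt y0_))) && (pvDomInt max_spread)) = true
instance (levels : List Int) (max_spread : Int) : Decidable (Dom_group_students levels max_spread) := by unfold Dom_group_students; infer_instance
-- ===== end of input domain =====

-- B replaces A's linear scan with a running minimum by binary-search (bisect_right) jumps from one
-- group start to the next on the sorted list (objective: alternative algorithm, same return value).
-- Both A and B sort `levels` in place (same mutation); the equivalence proved is about the return value.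

-- ===== PORT A =====
-- A: sort, then for i, lvl in enumerate(levels): if i == 0 or lvl - cur_min > max_spread: groups += 1; cur_min = lvl
def group_students (levels : List Int) (max_spread : Int) : Int :=
  let s := PySem.List.sorted levels (fun x => x) false
  let res := (PySem.List.enumerate s 0).foldl
    (fun (st : Int × Int) (p : Int × Int) =>
      if p.1 == 0 || p.2 - st.2 > max_spread then (st.1 + 1, p.2) else st)
    (0, 0)  -- cur_min is unset before the first iteration; the i == 0 branch always assigns it first
  res.1

-- ===== PORT B =====
-- inner while of Source B: hand-written bisect_right over the index range [lo, hi).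
-- The extra `fuel` argument is only a totality guard (hi - lo shrinks each step, so fuel = hi - lo
-- at the call site is never exhausted); every index read is in range, so List.getD is exact for
-- Python's levels[mid], and Nat (lo+hi)/2 is exact for Python's (lo+hi)//2 on nonnegative ints.
def pvBisectRight (xs : List Int) (bound : Int) : Nat → Nat → Nat → Nat
  | 0, lo, _ => lo
  | fuel + 1, lo, hi =>
    if lo < hi then
      let mid := (lo + hi) / 2
      if xs.getD mid 0 ≤ bound then pvBisectRight xs bound fuel (mid + 1) hi
      else pvBisectRight xs bound fuel lo mid
    else lo

-- outer while of Source B: one group per iteration, jump i to the bisect_right result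
-- (fuel = s.length + 1 is again only a totality guard: i advances every iteration)
def pvCountJump (s : List Int) (max_spread : Int) : Nat → Nat → Int
  | 0, _ => 0
  | fuel + 1, i =>
    if i < s.length then
      1 + pvCountJump s max_spread fuel
        (pvBisectRight s (s.getD i 0 + max_spread) (s.length - (i + 1)) (i + 1) s.length)
    else 0

def group_students_alt (levels : List Int) (max_spread : Int) : Int :=
  let s := PySem.List.sorted levels (fun x => x) false
  pvCountJump s max_spread (s.length + 1) 0

-- ===== PRECONDITION & SPEC =====
def Spec_group_students (levels : List Int) (max_spread : Int) (out : Int) : Prop := out = group_students_alt levels max_spread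
instance (levels : List Int) (max_spread : Int) (out : Int) : Decidable (Spec_group_students levels max_spread out) := by unfold Spec_group_students; infer_instance

-- ===== CLAIM (what is proved, stated in full; the proofs are below) =====
def Claim_equal_group_students : Prop := ∀ (levels : List Int) (max_spread : Int), Dom_group_students levels max_spread → Spec_group_students levels max_spread (group_students levels max_spread)

-- ===== LEMMAS AND PROOFS =====

-- common reference point of the two proofs: the greedy block count on the sorted list
-- (pvSkipBlock drops the maximal prefix within max_spread of the group's base)
def pvSkipBlock (base m : Int) : List Int → List Int
  | [] => []
  | x :: xs => if x - base ≤ m then pvSkipBlock base m xs else x :: xs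

theorem pvSkipBlock_length_le (base m : Int) (xs : List Int) :
    (pvSkipBlock base m xs).length ≤ xs.length := by
  induction xs with
  | nil => simp [pvSkipBlock]
  | cons x xs ih =>
    simp only [pvSkipBlock]
    split
    · exact Nat.le_succ_of_le ih
    · simp

def pvCountBlocks (m : Int) : List Int → Int
  | [] => 0
  | x :: xs => 1 + pvCountBlocks m (pvSkipBlock x m xs)
termination_by xs => xs.length
decreasing_by
  exact Nat.lt_succ_of_le (pvSkipBlock_length_le _ _ _)

theorem pvSkipBlock_eq_dropWhile (base m : Int) (xs : List Int) :
    pvSkipBlock base m xs = xs.dropWhile (fun y => decide (y - base ≤ m)) := by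
  induction xs with
  | nil => rfl
  | cons x xs ih =>
    simp only [pvSkipBlock, List.dropWhile_cons]
    by_cases h : x - base ≤ m <;> simp [h, ih]

-- ===== A side (no sortedness needed: the greedy rule IS the block decomposition) =====

-- A's fold over the tail (all indices nonzero), started in state (g, base), counts g plus the
-- blocks of what remains after skipping the current group.
theorem pvFold_tail (m : Int) (xs : List Int) :
    ∀ (k : Int) (g base : Int), 0 < k →
    ((PySem.List.enumerate xs k).foldl
      (fun (st : Int × Int) (p : Int × Int) =>
        if p.1 == 0 || p.2 - st.2 > m then (st.1 + 1, p.2) else st)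
      (g, base)).1 = g + pvCountBlocks m (pvSkipBlock base m xs) := by
  induction xs with
  | nil => intro k g base hk; simp [PySem.List.enumerate_nil, pvSkipBlock, pvCountBlocks]
  | cons x xs ih =>
    intro k g base hk
    rw [PySem.List.enumerate_cons, List.foldl_cons]
    by_cases h : x - base ≤ m
    · have hc : ((k == 0 : Bool) || decide (x - base > m)) = false := by
        simp only [Bool.or_eq_false_iff, beq_eq_false_iff_ne, ne_eq, decide_eq_false_iff_not, not_lt]
        exact ⟨by omega, h⟩
      simp only [hc, Bool.false_eq_true, if_false]
      rw [ih (k + 1) g base (by omega)]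
      simp [pvSkipBlock, h]
    · have hc : ((k == 0 : Bool) || decide (x - base > m)) = true := by
        simp only [Bool.or_eq_true, decide_eq_true_eq]
        right; omega
      simp only [hc, if_true]
      rw [ih (k + 1) (g + 1) x (by omega)]
      have hs : pvSkipBlock base m (x :: xs) = x :: xs := by
        simp [pvSkipBlock, h]
      rw [hs, pvCountBlocks]
      omega

-- A's full fold (from index 0, with its dummy initial cur_min) counts the blocks of the whole list.
theorem pvFold_all (m : Int) (l : List Int) :
    ((PySem.List.enumerate l 0).foldl
      (fun (st : Int × Int) (p : Int × Int) =>
        if p.1 == 0 || p.2 - st.2 > m then (st.1 + 1, p.2) else st)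
      (0, 0)).1 = pvCountBlocks m l := by
  cases l with
  | nil => simp [PySem.List.enumerate_nil, pvCountBlocks]
  | cons x xs =>
    rw [PySem.List.enumerate_cons, List.foldl_cons]
    have hc : (((0 : Int) == 0 : Bool) || decide (x - 0 > m)) = true := by simp
    simp only [hc, if_true]
    rw [pvFold_tail m xs (0 + 1) (0 + 1) x (by omega), pvCountBlocks]
    omega

-- ===== B side (sortedness makes bisect_right find the end of the greedy block) =====

-- the search result never moves left of lo (whatever the fuel)
theorem pvBisectRight_ge (xs : List Int) (bound : Int) :
    ∀ (fuel lo hi : Nat), lo ≤ pvBisectRight xs bound fuel lo hi := by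
  intro fuel
  induction fuel with
  | zero => intro lo hi; exact le_rfl
  | succ fuel ih =>
    intro lo hi
    simp only [pvBisectRight]
    split
    · split
      · exact le_trans (by omega) (ih _ hi)
      · exact ih lo _
    · exact le_rfl

-- characterisation of the binary-search result on a sorted list with enough fuel:
-- everything in [lo, result) is ≤ bound, and the element at result (if any) exceeds bound
theorem pvBisectRight_spec (xs : List Int) (bound : Int) (hs : xs.Pairwise (· ≤ ·)) :
    ∀ (fuel lo hi : Nat), hi ≤ xs.length → lo ≤ hi → hi - lo ≤ fuel →
    pvBisectRight xs bound fuel lo hi ≤ hi ∧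
    (∀ k, lo ≤ k → k < pvBisectRight xs bound fuel lo hi → xs.getD k 0 ≤ bound) ∧
    (pvBisectRight xs bound fuel lo hi < hi → ¬ xs.getD (pvBisectRight xs bound fuel lo hi) 0 ≤ bound) := by
  intro fuel
  induction fuel with
  | zero =>
    intro lo hi hhi hlo hf
    have : lo = hi := by omega
    subst this
    exact ⟨le_rfl, by intro k hk1 hk2; simp [pvBisectRight] at hk2; omega, by simp [pvBisectRight]⟩
  | succ fuel ih =>
    intro lo hi hhi hlo hf
    by_cases h : lo < hi
    · have hmid : (lo + hi) / 2 < hi ∧ lo ≤ (lo + hi) / 2 := by omega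
      simp only [pvBisectRight, if_pos h]
      by_cases hle : xs.getD ((lo + hi) / 2) 0 ≤ bound
      · simp only [if_pos hle]
        obtain ⟨h1, h2, h3⟩ := ih ((lo + hi) / 2 + 1) hi hhi (by omega) (by omega)
        refine ⟨h1, ?_, h3⟩
        intro k hk1 hk2
        by_cases hk : (lo + hi) / 2 + 1 ≤ k
        · exact h2 k hk hk2
        · have hkm : k ≤ (lo + hi) / 2 := by omega
          rcases eq_or_lt_of_le hkm with heq | hlt
          · rw [heq]; exact hle
          · have hmlen : (lo + hi) / 2 < xs.length := by omega
            have hklen : k < xs.length := by omega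
            have : xs.getD k 0 ≤ xs.getD ((lo + hi) / 2) 0 := by
              rw [List.getD_eq_getElem _ _ hklen, List.getD_eq_getElem _ _ hmlen]
              exact List.pairwise_iff_getElem.mp hs k ((lo + hi) / 2) hklen hmlen hlt
            omega
      · simp only [if_neg hle]
        obtain ⟨h1, h2, h3⟩ := ih lo ((lo + hi) / 2) (by omega) (by omega) (by omega)
        refine ⟨by omega, h2, ?_⟩
        intro hr
        by_cases hrm : pvBisectRight xs bound fuel lo ((lo + hi) / 2) < (lo + hi) / 2
        · exact h3 hrm
        · have hge := pvBisectRight_ge xs bound fuel lo ((lo + hi) / 2)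
          have heq : pvBisectRight xs bound fuel lo ((lo + hi) / 2) = (lo + hi) / 2 := by omega
          rw [heq]; exact hle
    · have : lo = hi := by omega
      subst this
      simp only [pvBisectRight, if_neg h]
      exact ⟨le_rfl, by intro k hk1 hk2; omega, by omega⟩

-- dropWhile of a prefix-true / stop-false predicate is a drop
theorem pvDropWhile_drop (p : Int → Bool) (s : List Int) (j d : Nat)
    (hr : j + d ≤ s.length)
    (hall : ∀ k, j ≤ k → k < j + d → p (s.getD k 0) = true)
    (hstop : j + d < s.length → p (s.getD (j + d) 0) = false) :
    (s.drop j).dropWhile p = s.drop (j + d) := by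
  induction d generalizing j with
  | zero =>
    by_cases h : j < s.length
    · rw [List.drop_eq_getElem_cons h, List.dropWhile_cons]
      have hp := hstop (by omega)
      simp only [Nat.add_zero] at hp ⊢
      rw [List.getD_eq_getElem _ _ h] at hp
      simp [hp]
    · rw [List.drop_eq_nil_of_le (by omega)]
      simp [List.drop_eq_nil_of_le (show s.length ≤ j by omega)]
  | succ d ih =>
    have hj : j < s.length := by omega
    rw [List.drop_eq_getElem_cons hj, List.dropWhile_cons]
    have hpj : p (s[j]'hj) = true := by
      have := hall j le_rfl (by omega)
      rwa [List.getD_eq_getElem _ _ hj] at this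
    rw [hpj]
    simp only [if_true]
    have := ih (j + 1) (by omega)
      (fun k hk1 hk2 => hall k (by omega) (by omega))
      (fun hlt => by have := hstop (by omega); rwa [show j + 1 + d = j + (d+1) from by omega])
    rw [this, show j + 1 + d = j + (d+1) from by omega]

-- B's jump loop from index i, given enough fuel, counts the blocks of the suffix from i
theorem pvCountJump_eq (m : Int) (s : List Int) (hs : s.Pairwise (· ≤ ·)) :
    ∀ (fuel i : Nat), s.length ≤ i + fuel →
    pvCountJump s m fuel i = pvCountBlocks m (s.drop i) := by
  intro fuel
  induction fuel with
  | zero =>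
    intro i hf
    rw [List.drop_eq_nil_of_le (by omega)]
    simp [pvCountJump, pvCountBlocks]
  | succ fuel ih =>
    intro i hf
    by_cases h : i < s.length
    · simp only [pvCountJump, if_pos h]
      set r := pvBisectRight s (s.getD i 0 + m) (s.length - (i + 1)) (i + 1) s.length with hrdef
      have hge := pvBisectRight_ge s (s.getD i 0 + m) (s.length - (i + 1)) (i + 1) s.length
      obtain ⟨h1, h2, h3⟩ :=
        pvBisectRight_spec s (s.getD i 0 + m) hs (s.length - (i + 1)) (i + 1) s.length
          le_rfl (by omega) (by omega)
      rw [← hrdef] at hge h1 h2 h3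
      rw [ih r (by omega), List.drop_eq_getElem_cons h, pvCountBlocks]
      have hbase : s.getD i 0 = s[i]'h := List.getD_eq_getElem _ _ h
      obtain ⟨d, hd⟩ : ∃ d, r = (i + 1) + d := ⟨r - (i + 1), by omega⟩
      have hskip : pvSkipBlock (s[i]'h) m (s.drop (i + 1)) = s.drop r := by
        rw [pvSkipBlock_eq_dropWhile, hd]
        apply pvDropWhile_drop
        · omega
        · intro k hk1 hk2
          have := h2 k hk1 (by omega)
          simp only [decide_eq_true_iff]
          rw [← hbase]; omega
        · intro hlt
          have := h3 (by omega)
          simp only [decide_eq_false_iff_not]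
          rw [← hbase, ← hd]; omega
      rw [hskip]
    · simp only [pvCountJump, if_neg h]
      rw [List.drop_eq_nil_of_le (by omega), pvCountBlocks]

-- ===== VERDICT (by name: the statement is the Claim_ definition above) =====
theorem group_students_spec : Claim_equal_group_students := by
  intro levels max_spread _
  unfold Spec_group_students group_students group_students_alt
  rw [pvFold_all]
  rw [pvCountJump_eq max_spread _ (PySem.List.sorted_pairwise (xs := levels) (key := fun x => x))
        ((PySem.List.sorted levels (fun x => x) false).length + 1) 0 (by omega)]
  simp
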